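-- pv_equiv track=rewrite | github.com/daamaleman/DoltMath-AlgebraLineal | algebra/logic/utilidades.py | crear_fraccion_desde_decimal
-- ===== SOURCE A (Python) =====
-- def mcd(a, b):
--     a = a if a >= 0 else -a
--     b = b if b >= 0 else -b
--     while b != 0:
--         resto = a % b
--         a = b
--         b = resto
--     return a
--
-- def simplificar_fraccion(numerador, denominador):
--     if denominador == 0:
--         raise Exception("Denominador cero.")
--     if denominador < 0:
--         numerador = -numerador
--         denominador = -denominador
--     divisor = mcd(numerador, denominador)
--     num_s = numerador // divisor
--     den_s = denominador // divisor
--     return [num_s, den_s]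
--
-- def crear_fraccion_desde_decimal(texto):
--     negativo = False
--     cadena = texto
--     if cadena[0] == "-":
--         negativo = True
--         cadena = cadena[1:]
--     partes = cadena.split(".")
--     if len(partes) == 1:
--         entero = int(partes[0])
--         if negativo:
--             entero = -entero
--         return [entero, 1]
--     parte_entera = partes[0]
--     parte_decimal = partes[1]
--     if parte_entera == "":
--         parte_entera = "0"
--     decimales = 0
--     indice = 0
--     while indice < len(parte_decimal):
--         if parte_decimal[indice].isdigit():
--             decimales = decimales + 1
--         indice = indice + 1
--     base = 1
--     j = 0
--     while j < decimales:
--         base = base * 10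
--         j = j + 1
--     numero_sin_punto = int(parte_entera + parte_decimal)
--     if negativo:
--         numero_sin_punto = -numero_sin_punto
--     return simplificar_fraccion(numero_sin_punto, base)
-- ===== SOURCE B (Python) =====
-- def crear_fraccion_desde_decimal(texto):
--     negativo = texto.startswith("-")
--     cadena = texto[1:] if negativo else texto
--     signo = -1 if negativo else 1
--     partes = cadena.split(".")
--     if len(partes) == 1:
--         return [signo * int(partes[0]), 1]
--     parte_entera = partes[0] if partes[0] != "" else "0"
--     parte_decimal = partes[1]
--     decimales = sum(1 for c in parte_decimal if c.isdigit())
--     num = signo * int(parte_entera + parte_decimal)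
--     den = 10 ** decimales
--     while num % 2 == 0 and den % 2 == 0:
--         num //= 2
--         den //= 2
--     while num % 5 == 0 and den % 5 == 0:
--         num //= 5
--         den //= 5
--     return [num, den]
-- ===== Notes on version B (the rewrite author's own statement) =====
-- stated objective: alternative
-- what changed: B replaces the hand-written Euclid GCD plus division (and the index/counter while-loops for digit count and base) by direct cancellation of the shared prime factors 2 and 5 of the power-of-ten denominator, a generator-sum digit count, 10**decimales, and a sign multiplier.
import Mathlib
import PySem

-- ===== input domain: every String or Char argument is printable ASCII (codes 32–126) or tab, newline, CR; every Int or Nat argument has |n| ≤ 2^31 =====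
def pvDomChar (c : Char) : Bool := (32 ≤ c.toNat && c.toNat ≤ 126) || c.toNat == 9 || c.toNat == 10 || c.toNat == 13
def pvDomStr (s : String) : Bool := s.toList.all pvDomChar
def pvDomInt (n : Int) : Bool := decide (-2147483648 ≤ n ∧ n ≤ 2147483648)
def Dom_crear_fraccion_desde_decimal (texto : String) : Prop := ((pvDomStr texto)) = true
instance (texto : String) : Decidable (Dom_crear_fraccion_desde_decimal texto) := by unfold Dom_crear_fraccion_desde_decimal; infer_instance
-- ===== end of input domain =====

-- B replaces A's Euclid-GCD simplification by cancellation of the shared factors 2 and 5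
-- of the power-of-ten denominator (objective: alternative algorithm, same return value).

-- ===== PORT A =====

-- while b != 0: resto = a % b; a = b; b = resto   (Python % = PySem.Int.mod)
def mcdLoop (a b : Int) : Int :=
  if _h : b ≠ 0 then mcdLoop b (PySem.Int.mod a b) else a
termination_by b.natAbs
decreasing_by
  rcases lt_trichotomy b 0 with hb | hb | hb
  · have h1 := PySem.Int.mod_neg_bounds a (b := b) hb
    omega
  · exact absurd hb _h
  · have h1 := PySem.Int.mod_nonneg a (b := b) hb
    have h2 := PySem.Int.mod_lt a (b := b) hb
    omega

def mcd (a b : Int) : Int :=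
  let a := if a ≥ 0 then a else -a
  let b := if b ≥ 0 then b else -b
  mcdLoop a b

-- 'denominador == 0' raises in Python; unreachable from the entry (there denominador = 10^k ≥ 1)
def simplificar_fraccion (numerador denominador : Int) : List Int :=
  let nd := if denominador < 0 then (-numerador, -denominador) else (numerador, denominador)
  let divisor := mcd nd.1 nd.2
  [PySem.Int.floordiv nd.1 divisor, PySem.Int.floordiv nd.2 divisor]

-- while indice < len(parte_decimal): if parte_decimal[indice].isdigit(): decimales += 1; indice += 1
-- (the indexed 1-char string's .isdigit() is exactly PySem.Chars.isdigit of that char)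
def digitCountLoop (s : List Char) (decimales indice : Int) : Int :=
  if PySem.List.len s ≤ indice then decimales
  else
    digitCountLoop s
      (if PySem.Chars.isdigit (PySem.List.pyGetD s indice ' ') then decimales + 1 else decimales)
      (indice + 1)
termination_by (PySem.List.len s - indice).toNat
decreasing_by
  simp only [PySem.List.len_eq] at *
  omega

-- while j < decimales: base = base * 10; j = j + 1
def baseLoop (decimales base j : Int) : Int :=
  if j < decimales then baseLoop decimales (base * 10) (j + 1) else base
termination_by (decimales - j).toNat
decreasing_by omega

def crear_fraccion_desde_decimal (texto : String) : List Int :=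
  let cadena0 := texto.toList
  -- cadena[0] == "-"  (IndexError on "" excluded by Pre_)
  let negativo := PySem.List.pyGet? cadena0 0 == some '-'
  let cadena := if negativo then PySem.Chars.slice cadena0 (some 1) none else cadena0
  let partes := PySem.Chars.splitOn cadena ['.']
  if partes.length = 1 then
    match PySem.Int.ofChars? (PySem.List.pyGetD partes 0 []) with
    | none => []  -- int() ValueError, excluded by Pre_
    | some entero => [if negativo then -entero else entero, 1]
  else
    let parte_entera0 := PySem.List.pyGetD partes 0 []
    let parte_decimal := PySem.List.pyGetD partes 1 []
    let parte_entera := if parte_entera0 = [] then ['0'] else parte_entera0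
    let decimales := digitCountLoop parte_decimal 0 0
    let base := baseLoop decimales 1 0
    match PySem.Int.ofChars? (parte_entera ++ parte_decimal) with
    | none => []  -- int() ValueError, excluded by Pre_
    | some n => simplificar_fraccion (if negativo then -n else n) base

-- ===== PORT B =====

-- while num % p == 0 and den % p == 0: num //= p; den //= p
-- (fuel |den| bounds the iteration count; the loop runs with den a positive power of ten)
def cancelLoop (p num den : Int) (fuel : Nat) : Int × Int :=
  match fuel with
  | 0 => (num, den)
  | f + 1 =>
    if PySem.Int.mod num p == 0 && PySem.Int.mod den p == 0 then
      cancelLoop p (PySem.Int.floordiv num p) (PySem.Int.floordiv den p) f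
    else (num, den)

def crear_fraccion_desde_decimal_alt (texto : String) : List Int :=
  let cs := texto.toList
  let negativo := PySem.Chars.startswith cs ['-']
  let cadena := if negativo then PySem.Chars.slice cs (some 1) none else cs
  let signo : Int := if negativo then -1 else 1
  let partes := PySem.Chars.splitOn cadena ['.']
  if partes.length = 1 then
    match PySem.Int.ofChars? (PySem.List.pyGetD partes 0 []) with
    | none => []  -- int() ValueError, excluded by Pre_
    | some n => [signo * n, 1]
  else
    let parte_entera :=
      if PySem.List.pyGetD partes 0 [] ≠ [] then PySem.List.pyGetD partes 0 [] else ['0']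
    let parte_decimal := PySem.List.pyGetD partes 1 []
    let decimales := (parte_decimal.filter (fun c => PySem.Chars.isdigit c)).length
    match PySem.Int.ofChars? (parte_entera ++ parte_decimal) with
    | none => []  -- int() ValueError, excluded by Pre_
    | some m =>
      let num := signo * m
      let den : Int := (10 : Int) ^ decimales
      let nd1 := cancelLoop 2 num den den.natAbs
      let nd2 := cancelLoop 5 nd1.1 nd1.2 nd1.2.natAbs
      [nd2.1, nd2.2]

-- ===== PRECONDITION & SPEC =====

-- Pre_ excludes exactly the inputs where Python A raises: the empty string (IndexError on
-- texto[0]) and the strings whose relevant int(...) call raises ValueError.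
def Pre_crear_fraccion_desde_decimal (texto : String) : Prop :=
  texto.toList ≠ [] ∧
  (let cs := texto.toList
   let cadena := if cs.headD ' ' = '-' then cs.tail else cs
   let partes := PySem.Chars.splitOn cadena ['.']
   if partes.length = 1 then (PySem.Int.ofChars? (partes.headD [])).isSome = true
   else (PySem.Int.ofChars?
          ((if partes.headD [] = [] then ['0'] else partes.headD []) ++
            (partes.tail.headD []))).isSome = true)
instance (texto : String) : Decidable (Pre_crear_fraccion_desde_decimal texto) := by
  unfold Pre_crear_fraccion_desde_decimal; infer_instance

def pvWitness_crear_fraccion_desde_decimal : String := "-0.75"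

def Spec_crear_fraccion_desde_decimal (texto : String) (out : List Int) : Prop := out = crear_fraccion_desde_decimal_alt texto
instance (texto : String) (out : List Int) : Decidable (Spec_crear_fraccion_desde_decimal texto out) := by unfold Spec_crear_fraccion_desde_decimal; infer_instance

-- ===== CLAIM (what is proved, stated in full; the proofs are below) =====
def Claim_equal_crear_fraccion_desde_decimal : Prop := ∀ (texto : String), Dom_crear_fraccion_desde_decimal texto → Pre_crear_fraccion_desde_decimal texto → Spec_crear_fraccion_desde_decimal texto (crear_fraccion_desde_decimal texto)

-- ===== LEMMAS AND PROOFS =====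

-- negativo: A's cadena[0] == "-" test equals B's startswith("-")
theorem pv_neg_eq (cs : List Char) :
    (PySem.List.pyGet? cs 0 == some '-') = PySem.Chars.startswith cs ['-'] := by
  cases cs with
  | nil => decide
  | cons c t =>
    rw [Bool.eq_iff_iff]
    simp [PySem.Chars.startswith_iff, List.cons_prefix_cons]
    exact eq_comm

-- A's digit-count loop is the length of B's digit filter
theorem pv_dc_aux (s : List Char) : ∀ (m i : Nat) (acc : Int), s.length - i ≤ m →
    digitCountLoop s acc (i : Int) = acc + (((s.drop i).filter (fun c => PySem.Chars.isdigit c)).length : Int) := by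
  intro m
  induction m with
  | zero =>
    intro i acc h
    rw [digitCountLoop]
    simp only [PySem.List.len_eq]
    rw [if_pos (by omega)]
    rw [List.drop_of_length_le (by omega)]
    simp
  | succ m ih =>
    intro i acc h
    by_cases hi : i < s.length
    · rw [digitCountLoop]
      simp only [PySem.List.len_eq]
      rw [if_neg (by omega)]
      have h1 : PySem.List.pyGetD s (i : Int) ' ' = s[i] := by
        simp [PySem.List.pyGetD_natCast, List.getElem?_eq_getElem hi]
      have h2 : (i : Int) + 1 = ((i + 1 : Nat) : Int) := by push_cast; ring
      rw [h1, h2, ih (i+1) _ (by omega)]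
      rw [List.drop_eq_getElem_cons hi]
      by_cases hd : PySem.Chars.isdigit s[i] = true
      · rw [if_pos hd]
        simp only [List.filter_cons, hd, if_true, List.length_cons]
        push_cast; ring
      · rw [if_neg hd]
        simp only [List.filter_cons, hd, Bool.false_eq_true, if_false]
    · rw [digitCountLoop]
      simp only [PySem.List.len_eq]
      rw [if_pos (by omega)]
      rw [List.drop_of_length_le (by omega)]
      simp

theorem pv_digitCount (s : List Char) :
    digitCountLoop s 0 0 = ((s.filter (fun c => PySem.Chars.isdigit c)).length : Int) := by
  have := pv_dc_aux s s.length 0 0 (by omega)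
  simpa using this

-- A's base loop is 10^decimales
theorem pv_base_aux : ∀ (m : Nat) (j b : Int), baseLoop (j + m) b j = b * 10 ^ m := by
  intro m
  induction m with
  | zero => intro j b; rw [baseLoop]; simp
  | succ m ih =>
    intro j b
    rw [baseLoop, if_pos (by push_cast; omega)]
    have h : (j + ((m : Int) + 1)) = (j + 1) + (m : Int) := by ring
    rw [show ((m + 1 : Nat) : Int) = (m : Int) + 1 by push_cast; ring, h, ih (j+1) (b*10)]
    ring

theorem pv_base (k : Nat) : baseLoop (k : Int) 1 0 = (10 : Int) ^ k := by
  have := pv_base_aux k 0 1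
  simpa using this

-- Euclid computes the gcd
theorem pv_mcdLoop_eq : ∀ (m : Nat) (a b : Int), 0 ≤ a → 0 ≤ b → b.natAbs ≤ m →
    mcdLoop a b = (Int.gcd a b : Int) := by
  intro m
  induction m with
  | zero =>
    intro a b ha hb hm
    have hb0 : b = 0 := by omega
    subst hb0
    rw [mcdLoop]
    simp [Int.gcd]
    rw [abs_of_nonneg ha]
  | succ m ih =>
    intro a b ha hb hm
    by_cases h0 : b = 0
    · subst h0; rw [mcdLoop]; simp [Int.gcd]
      rw [abs_of_nonneg ha]
    · have hbpos : 0 < b := by omega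
      rw [mcdLoop, dif_pos h0]
      have hr0 := PySem.Int.mod_nonneg a hbpos
      have hrl := PySem.Int.mod_lt a hbpos
      rw [ih b _ hb hr0 (by omega)]
      rw [PySem.Int.mod_eq_emod_of_pos (a := a) hbpos]
      congr 1
      rw [Int.gcd_comm b (a % b), Int.gcd_emod a b]

theorem pv_mcd_eq (a b : Int) : mcd a b = (Int.gcd a b : Int) := by
  unfold mcd
  have h1 : (if a ≥ 0 then a else -a) = (a.natAbs : Int) := by split <;> omega
  have h2 : (if b ≥ 0 then b else -b) = (b.natAbs : Int) := by split <;> omega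
  simp only [h1, h2]
  rw [pv_mcdLoop_eq b.natAbs _ _ (by positivity) (by positivity) (by simp [Int.natAbs_abs])]
  simp [Int.gcd, Int.natAbs_abs]

-- the cancellation loop divides num and den by the same power of p
theorem pv_cancel_decomp (p : Int) (hp : 0 < p) :
    ∀ (fuel : Nat) (num den : Int), ∃ j : Nat,
      num = (cancelLoop p num den fuel).1 * p ^ j ∧
      den = (cancelLoop p num den fuel).2 * p ^ j := by
  intro fuel
  induction fuel with
  | zero => intro num den; exact ⟨0, by simp [cancelLoop]⟩
  | succ f ih =>
    intro num den
    rw [cancelLoop]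
    by_cases hc : (PySem.Int.mod num p == 0 && PySem.Int.mod den p == 0) = true
    · rw [if_pos hc]
      simp only [Bool.and_eq_true, beq_iff_eq, PySem.Int.mod_eq_zero_iff_dvd] at hc
      obtain ⟨hn, hd⟩ := hc
      obtain ⟨j, h1, h2⟩ := ih (PySem.Int.floordiv num p) (PySem.Int.floordiv den p)
      refine ⟨j + 1, ?_, ?_⟩
      · rw [pow_succ, ← mul_assoc, ← h1, PySem.Int.floordiv_eq_ediv_of_pos hp,
          Int.ediv_mul_cancel hn]
      · rw [pow_succ, ← mul_assoc, ← h2, PySem.Int.floordiv_eq_ediv_of_pos hp,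
          Int.ediv_mul_cancel hd]
    · rw [if_neg hc]; exact ⟨0, by simp⟩

-- with enough fuel and a positive denominator, p no longer divides both at exit
theorem pv_cancel_exit (p : Int) (hp : 1 < p) :
    ∀ (fuel : Nat) (num den : Int), 0 < den → den.natAbs ≤ fuel →
      ¬(p ∣ (cancelLoop p num den fuel).1 ∧ p ∣ (cancelLoop p num den fuel).2) := by
  intro fuel
  induction fuel with
  | zero => intro num den hd hf; omega
  | succ f ih =>
    intro num den hd hf
    rw [cancelLoop]
    by_cases hc : (PySem.Int.mod num p == 0 && PySem.Int.mod den p == 0) = true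
    · rw [if_pos hc]
      simp only [Bool.and_eq_true, beq_iff_eq, PySem.Int.mod_eq_zero_iff_dvd] at hc
      obtain ⟨hn, hdv⟩ := hc
      have hple : p ≤ den := Int.le_of_dvd hd hdv
      have hq : PySem.Int.floordiv den p = den / p := PySem.Int.floordiv_eq_ediv_of_pos (by omega)
      have hq1 : 0 < den / p := Int.ediv_pos_of_pos_of_dvd hd (by omega) hdv
      have hq2 : den / p < den := by
        apply Int.ediv_lt_of_lt_mul (by omega)
        nlinarith
      apply ih
      · rw [hq]; exact hq1
      · rw [hq]; omega
    · rw [if_neg hc]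
      rintro ⟨h1, h2⟩
      apply hc
      simp [PySem.Int.mod_eq_zero_iff_dvd, h1, h2]

-- the 2/5 cancellation equals division by the gcd when the denominator is 10^k
theorem pv_reduce_eq (n : Int) (k : Nat) :
    simplificar_fraccion n ((10 : Int) ^ k) =
      [(cancelLoop 5 (cancelLoop 2 n ((10:Int)^k) ((10:Int)^k).natAbs).1
          (cancelLoop 2 n ((10:Int)^k) ((10:Int)^k).natAbs).2
          (cancelLoop 2 n ((10:Int)^k) ((10:Int)^k).natAbs).2.natAbs).1,
       (cancelLoop 5 (cancelLoop 2 n ((10:Int)^k) ((10:Int)^k).natAbs).1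
          (cancelLoop 2 n ((10:Int)^k) ((10:Int)^k).natAbs).2
          (cancelLoop 2 n ((10:Int)^k) ((10:Int)^k).natAbs).2.natAbs).2] := by
  have hden : (0:Int) < (10:Int)^k := by positivity
  obtain ⟨a, hna, hda⟩ := pv_cancel_decomp 2 (by norm_num) ((10:Int)^k).natAbs n ((10:Int)^k)
  have hx2 := pv_cancel_exit 2 (by norm_num) ((10:Int)^k).natAbs n ((10:Int)^k) hden le_rfl
  rcases hq1 : cancelLoop 2 n ((10:Int)^k) ((10:Int)^k).natAbs with ⟨n1, d1⟩
  rw [hq1] at hna hda hx2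
  dsimp only at hna hda hx2 ⊢
  have h2a : (0:Int) < 2 ^ a := by positivity
  have hd1pos : 0 < d1 := by nlinarith
  obtain ⟨b, hnb, hdb⟩ := pv_cancel_decomp 5 (by norm_num) d1.natAbs n1 d1
  have hx5 := pv_cancel_exit 5 (by norm_num) d1.natAbs n1 d1 hd1pos le_rfl
  rcases hq2 : cancelLoop 5 n1 d1 d1.natAbs with ⟨n2, d2⟩
  rw [hq2] at hnb hdb hx5
  dsimp only at hnb hdb hx5 ⊢
  have h5b : (0:Int) < 5 ^ b := by positivity
  have hd2pos : 0 < d2 := by nlinarith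
  have hcpos : (0:Int) < 2 ^ a * 5 ^ b := by positivity
  have hnc : n = n2 * (2 ^ a * 5 ^ b) := by rw [hna, hnb]; ring
  have hdc : (10:Int)^k = d2 * (2 ^ a * 5 ^ b) := by rw [hda, hdb]; ring
  have hx2' : ¬((2:Int) ∣ n2 ∧ (2:Int) ∣ d2) := by
    rintro ⟨h1, h2⟩
    exact hx2 ⟨hnb ▸ h1.mul_right _, hdb ▸ h2.mul_right _⟩
  have hg : Int.gcd n2 d2 = 1 := by
    by_contra hne
    obtain ⟨q, hq, hqg⟩ := Nat.exists_prime_and_dvd hne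
    have hqn2 : (q:Int) ∣ n2 := dvd_trans (Int.natCast_dvd_natCast.mpr hqg) (Int.gcd_dvd_left _ _)
    have hqd2 : (q:Int) ∣ d2 := dvd_trans (Int.natCast_dvd_natCast.mpr hqg) (Int.gcd_dvd_right _ _)
    have hq10k : q ∣ 10 ^ k := by
      have h1 : (q:Int) ∣ (10:Int)^k := hdc ▸ hqd2.mul_right (2 ^ a * 5 ^ b)
      exact_mod_cast h1
    have hq10 : q ∣ 10 := hq.dvd_of_dvd_pow hq10k
    have h2le := hq.two_le
    have hle : q ≤ 10 := Nat.le_of_dvd (by norm_num) hq10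
    have hq25 : q = 2 ∨ q = 5 := by interval_cases q <;> revert hq hq10 <;> decide
    rcases hq25 with h | h
    · subst h; exact hx2' ⟨by exact_mod_cast hqn2, by exact_mod_cast hqd2⟩
    · subst h; exact hx5 ⟨by exact_mod_cast hqn2, by exact_mod_cast hqd2⟩
  have hgcd : (Int.gcd n ((10:Int)^k) : Int) = 2 ^ a * 5 ^ b := by
    rw [hnc, hdc, Int.gcd_mul_right, hg, one_mul]
    simp [Int.natAbs_of_nonneg hcpos.le]
  unfold simplificar_fraccion
  rw [if_neg (by omega)]
  simp only
  rw [pv_mcd_eq, hgcd]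
  rw [PySem.Int.floordiv_eq_ediv_of_pos hcpos, PySem.Int.floordiv_eq_ediv_of_pos hcpos]
  rw [hnc, hdc, Int.mul_ediv_cancel _ (by omega), Int.mul_ediv_cancel _ (by omega)]

theorem pv_pe (pe0 : List Char) :
    (if pe0 = [] then ['0'] else pe0) = (if pe0 ≠ [] then pe0 else ['0']) := by
  by_cases h : pe0 = [] <;> simp [h]

theorem crear_fraccion_desde_decimal_spec : Claim_equal_crear_fraccion_desde_decimal := by
  intro texto _ _
  unfold Spec_crear_fraccion_desde_decimal crear_fraccion_desde_decimal crear_fraccion_desde_decimal_alt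
  simp only [pv_neg_eq]
  generalize texto.toList = cs
  cases hneg : PySem.Chars.startswith cs ['-'] <;>
    simp only [Bool.false_eq_true, if_false, if_true, ← pv_pe,
      pv_digitCount, pv_base]
  case false =>
    by_cases hlen : (PySem.Chars.splitOn cs ['.']).length = 1
    · simp only [hlen, if_true]
      cases hof : PySem.Int.ofChars? (PySem.List.pyGetD (PySem.Chars.splitOn cs ['.']) 0 []) <;>
        simp [one_mul]
    · simp only [hlen, if_false]
      cases hof : PySem.Int.ofChars?
          ((if PySem.List.pyGetD (PySem.Chars.splitOn cs ['.']) 0 [] = [] then ['0']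
            else PySem.List.pyGetD (PySem.Chars.splitOn cs ['.']) 0 []) ++
            PySem.List.pyGetD (PySem.Chars.splitOn cs ['.']) 1 []) with
      | none => simp
      | some n =>
        simp only [one_mul]
        exact pv_reduce_eq n _
  case true =>
    by_cases hlen : (PySem.Chars.splitOn (PySem.Chars.slice cs (some 1) none) ['.']).length = 1
    · simp only [hlen, if_true]
      cases hof : PySem.Int.ofChars?
          (PySem.List.pyGetD (PySem.Chars.splitOn (PySem.Chars.slice cs (some 1) none) ['.']) 0 []) <;>
        simp
    · simp only [hlen, if_false]
      cases hof : PySem.Int.ofChars?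
          ((if PySem.List.pyGetD (PySem.Chars.splitOn (PySem.Chars.slice cs (some 1) none) ['.']) 0 [] = [] then ['0']
            else PySem.List.pyGetD (PySem.Chars.splitOn (PySem.Chars.slice cs (some 1) none) ['.']) 0 []) ++
            PySem.List.pyGetD (PySem.Chars.splitOn (PySem.Chars.slice cs (some 1) none) ['.']) 1 []) with
      | none => simp
      | some n =>
        simp only [neg_one_mul]
        exact pv_reduce_eq (-n) _
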